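-- pv_equiv track=rewrite | github.com/sin6708k/Algorithms | divide_and_conquer/sorting_coordinates_2.py | solution
-- ===== SOURCE A (Python) =====
-- def solution(N: int, all_coordinates: list[tuple[int, int]]):
--     def merge(left_coordinates: list[tuple[int, int]],
--               right_coordinates: list[tuple[int, int]]) -> list[tuple[int, int]]:
--         i = 0
--         j = 0
--         nums = []
--
--         while True:
--             if i == len(left_coordinates):
--                 nums.extend(right_coordinates[j:])
--                 break
--             if j == len(right_coordinates):
--                 nums.extend(left_coordinates[i:])
--                 break
--
--             if tuple(reversed(left_coordinates[i])) <= tuple(reversed(right_coordinates[j])):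
--                 nums.append(left_coordinates[i])
--                 i += 1
--             else:
--                 nums.append(right_coordinates[j])
--                 j += 1
--         return nums
--
--     def sort(coordinates: list[tuple[int, int]]) -> list[tuple[int, int]]:
--         if len(coordinates) == 1:
--             return coordinates
--
--         mid = len(coordinates) // 2
--         return merge(sort(coordinates[:mid]), sort(coordinates[mid:]))
--
--     # BEGIN
--     return '\n'.join(' '.join(map(str, coordinate))
--                      for coordinate in sort(all_coordinates))
-- ===== SOURCE B (Python) =====
-- def solution(N: int, all_coordinates: list[tuple[int, int]]):
--     ordered = sorted(all_coordinates, key=lambda c: (c[1], c[0]))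
--     return '\n'.join(' '.join(map(str, c)) for c in ordered)
-- ===== Notes on version B (the rewrite author's own statement) =====
-- stated objective: idiomatic
-- what changed: Replaces the hand-written recursive merge sort (merge + divide-and-conquer sort helpers) with one call to Python's built-in stable sort over the same (y, x) key, then formats the result the same way.
import Mathlib
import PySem

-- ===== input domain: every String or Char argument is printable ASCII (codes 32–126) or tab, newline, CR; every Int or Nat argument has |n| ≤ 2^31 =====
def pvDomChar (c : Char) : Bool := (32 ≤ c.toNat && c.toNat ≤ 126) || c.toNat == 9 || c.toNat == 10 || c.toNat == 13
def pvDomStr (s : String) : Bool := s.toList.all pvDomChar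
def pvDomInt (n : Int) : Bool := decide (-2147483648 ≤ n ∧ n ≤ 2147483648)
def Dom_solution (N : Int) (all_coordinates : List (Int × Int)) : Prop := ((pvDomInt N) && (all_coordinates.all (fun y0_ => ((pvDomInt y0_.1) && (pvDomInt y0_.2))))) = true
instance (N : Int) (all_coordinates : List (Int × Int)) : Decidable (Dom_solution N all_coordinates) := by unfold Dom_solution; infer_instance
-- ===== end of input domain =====

-- B replaces A's hand-written recursive merge sort with the built-in stable sort over the
-- same (y, x) key (objective: idiomatic; same formatting of the result).

-- ' '.join(map(str, coordinate)) for a 2-tuple — shared verbatim by both Pythons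
def fmtCoord (c : Int × Int) : String :=
  PySem.Str.join " " [PySem.Int.toStr c.1, PySem.Int.toStr c.2]

-- ===== PORT A =====
-- A's merge: the while-loop over indices i, j, transcribed as recursion on the two lists
-- (i == len / j == len branches are the [] cases; the tail slices left[i:], right[j:] are the
-- remaining lists). Python's tuple comparison tuple(reversed(a)) <= tuple(reversed(b)) is the
-- lexicographic test written out: a.2 < b.2 ∨ (a.2 = b.2 ∧ a.1 ≤ b.1).
def mergeA : List (Int × Int) → List (Int × Int) → List (Int × Int)
  | [], r => r
  | a :: l, [] => a :: l
  | a :: l, b :: r =>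
    if a.2 < b.2 ∨ (a.2 = b.2 ∧ a.1 ≤ b.1) then
      a :: mergeA l (b :: r)
    else
      b :: mergeA (a :: l) r
termination_by l r => l.length + r.length

-- A's sort: len(c)//2 on a Nat length is Nat division (PySem.Int.floordiv_natCast), and the
-- slices c[:mid], c[mid:] with 0 ≤ mid ≤ len are exactly take/drop (PySem.List.slice_to_natCast,
-- slice_from_natCast). Python's base case is len == 1 and it recurses forever on []; the
-- length ≤ 1 guard only makes that same computation total (the empty input is outside Pre_).
def sortA (c : List (Int × Int)) : List (Int × Int) :=
  if h : c.length ≤ 1 then c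
  else
    mergeA (sortA (c.take (c.length / 2))) (sortA (c.drop (c.length / 2)))
termination_by c.length
decreasing_by
  · simp only [List.length_take]; omega
  · simp only [List.length_drop]; omega

def solution (N : Int) (all_coordinates : List (Int × Int)) : String :=
  PySem.Str.join "\n" ((sortA all_coordinates).map fmtCoord)

-- ===== PORT B =====
-- sorted(all_coordinates, key=lambda c: (c[1], c[0])) is PySem.List.sorted2 with the tuple key
def solution_alt (N : Int) (all_coordinates : List (Int × Int)) : String :=
  PySem.Str.join "\n"
    ((PySem.List.sorted2 all_coordinates (fun c => c.2) (fun c => c.1)).map fmtCoord)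

-- ===== PRECONDITION & SPEC =====
-- Pre_ excludes only the empty list, on which Python A raises RecursionError (its base case is len == 1).
def Pre_solution (N : Int) (all_coordinates : List (Int × Int)) : Prop := all_coordinates ≠ []
instance (N : Int) (all_coordinates : List (Int × Int)) : Decidable (Pre_solution N all_coordinates) := by unfold Pre_solution; infer_instance
def pvWitness_solution : Int × (List (Int × Int)) := (3, [(1, 2), (3, 1), (1, 1)])

def Spec_solution (N : Int) (all_coordinates : List (Int × Int)) (out : String) : Prop := out = solution_alt N all_coordinates
instance (N : Int) (all_coordinates : List (Int × Int)) (out : String) : Decidable (Spec_solution N all_coordinates out) := by unfold Spec_solution; infer_instance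

-- ===== CLAIM (what is proved, stated in full; the proofs are below) =====
def Claim_equal_solution : Prop := ∀ (N : Int) (all_coordinates : List (Int × Int)), Dom_solution N all_coordinates → Pre_solution N all_coordinates → Spec_solution N all_coordinates (solution N all_coordinates)

-- ===== LEMMAS AND PROOFS =====

-- the (y, x) sort key, valued in the lexicographic order on pairs
def keyL (c : Int × Int) : Lex (Int × Int) := toLex (c.2, c.1)

theorem keyL_inj : Function.Injective keyL := by
  intro a b h
  have := toLex.injective h
  exact Prod.ext (congrArg Prod.snd this) (congrArg Prod.fst this)

theorem keyL_le_iff (a b : Int × Int) :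
    keyL a ≤ keyL b ↔ (a.2 < b.2 ∨ (a.2 = b.2 ∧ a.1 ≤ b.1)) := by
  simpa [keyL] using (Prod.Lex.toLex_le_toLex (x := (a.2, a.1)) (y := (b.2, b.1)))

theorem mergeA_perm (l r : List (Int × Int)) : (mergeA l r).Perm (l ++ r) := by
  induction l, r using mergeA.induct with
  | case1 r => simp [mergeA]
  | case2 a l => simp [mergeA]
  | case3 a l b r h ih =>
    rw [mergeA, if_pos h]
    exact (ih.cons a)
  | case4 a l b r h ih =>
    rw [mergeA, if_neg h]
    exact (ih.cons b).trans List.perm_middle.symm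

theorem mergeA_pairwise (l r : List (Int × Int))
    (hl : l.Pairwise (fun a b => keyL a ≤ keyL b))
    (hr : r.Pairwise (fun a b => keyL a ≤ keyL b)) :
    (mergeA l r).Pairwise (fun a b => keyL a ≤ keyL b) := by
  induction l, r using mergeA.induct with
  | case1 r => simpa [mergeA] using hr
  | case2 a l => simpa [mergeA] using hl
  | case3 a l b r h ih =>
    rw [mergeA, if_pos h]
    rw [List.pairwise_cons] at hl
    have hab : keyL a ≤ keyL b := (keyL_le_iff a b).2 h
    refine List.pairwise_cons.2 ⟨?_, ih hl.2 hr⟩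
    intro z hz
    have hz' : z ∈ l ++ (b :: r) := (mergeA_perm l (b :: r)).mem_iff.1 hz
    rcases List.mem_append.1 hz' with hzl | hzbr
    · exact hl.1 z hzl
    · rcases List.mem_cons.1 hzbr with rfl | hzr
      · exact hab
      · exact le_trans hab ((List.pairwise_cons.1 hr).1 z hzr)
  | case4 a l b r h ih =>
    rw [mergeA, if_neg h]
    rw [List.pairwise_cons] at hr
    have hba : keyL b ≤ keyL a := le_of_not_ge (fun hab => h ((keyL_le_iff a b).1 hab))
    refine List.pairwise_cons.2 ⟨?_, ih hl hr.2⟩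
    intro z hz
    have hz' : z ∈ (a :: l) ++ r := (mergeA_perm (a :: l) r).mem_iff.1 hz
    rcases List.mem_append.1 hz' with hzal | hzr
    · rcases List.mem_cons.1 hzal with rfl | hzl
      · exact hba
      · exact le_trans hba ((List.pairwise_cons.1 hl).1 z hzl)
    · exact hr.1 z hzr

theorem sortA_perm (c : List (Int × Int)) : (sortA c).Perm c := by
  induction c using sortA.induct with
  | case1 c h => rw [sortA, dif_pos h]
  | case2 c h ih1 ih2 =>
    rw [sortA, dif_neg h]
    exact ((mergeA_perm _ _).trans (ih1.append ih2)).trans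
      (by rw [List.take_append_drop])

theorem sortA_pairwise (c : List (Int × Int)) :
    (sortA c).Pairwise (fun a b => keyL a ≤ keyL b) := by
  induction c using sortA.induct with
  | case1 c h =>
    rw [sortA, dif_pos h]
    match c, h with
    | [], _ => exact List.Pairwise.nil
    | [x], _ => simp
  | case2 c h ih1 ih2 =>
    rw [sortA, dif_neg h]
    exact mergeA_pairwise _ _ ih1 ih2

-- the Boolean strict-lex test sorted2 inserts with
theorem sorted2_before_iff (a b : Int × Int) :
    (decide (a.2 < b.2) || (!decide (b.2 < a.2) && decide (a.1 < b.1))) = true ↔ keyL a < keyL b := by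
  have : keyL a < keyL b ↔ (a.2 < b.2 ∨ (a.2 = b.2 ∧ a.1 < b.1)) := by
    simpa [keyL] using (Prod.Lex.toLex_lt_toLex (x := (a.2, a.1)) (y := (b.2, b.1)))
  rw [this]
  simp only [Bool.or_eq_true, Bool.and_eq_true, Bool.not_eq_true', decide_eq_true_eq,
    decide_eq_false_iff_not]
  omega

theorem insertBy_pairwise (x : Int × Int) (ys : List (Int × Int))
    (hy : ys.Pairwise (fun a b => keyL a ≤ keyL b)) :
    (PySem.List.insertBy
        (fun a b => decide (a.2 < b.2) || (!decide (b.2 < a.2) && decide (a.1 < b.1))) x ys).Pairwise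
      (fun a b => keyL a ≤ keyL b) := by
  induction ys with
  | nil => simp [PySem.List.insertBy]
  | cons y ys ih =>
    rw [List.pairwise_cons] at hy
    rw [PySem.List.insertBy]
    split_ifs with h
    · refine List.pairwise_cons.2 ⟨?_, List.pairwise_cons.2 hy⟩
      intro z hz
      have hxy : keyL x ≤ keyL y := le_of_lt ((sorted2_before_iff x y).1 h)
      rcases List.mem_cons.1 hz with rfl | hzys
      · exact hxy
      · exact le_trans hxy (hy.1 z hzys)
    · refine List.pairwise_cons.2 ⟨?_, ih hy.2⟩
      intro z hz
      rcases (PySem.List.mem_insertBy _ x z ys).1 hz with rfl | hzys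
      · exact le_of_not_gt (fun hlt => h ((sorted2_before_iff z y).2 hlt))
      · exact hy.1 z hzys

theorem sorted2_pairwise_keyL (c : List (Int × Int)) :
    (PySem.List.sorted2 c (fun c => c.2) (fun c => c.1)).Pairwise (fun a b => keyL a ≤ keyL b) := by
  show (List.foldl _ [] c).Pairwise _
  have : ∀ (xs acc : List (Int × Int)), acc.Pairwise (fun a b => keyL a ≤ keyL b) →
      (List.foldl (fun acc x => PySem.List.insertBy
        (fun a b => decide (a.2 < b.2) || (!decide (b.2 < a.2) && decide (a.1 < b.1))) x acc) acc xs).Pairwise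
        (fun a b => keyL a ≤ keyL b) := by
    intro xs
    induction xs with
    | nil => intro acc h; simpa using h
    | cons x xs ih =>
      intro acc h
      exact ih _ (insertBy_pairwise x acc h)
  exact this c [] List.Pairwise.nil

theorem sortA_eq_sorted2 (c : List (Int × Int)) :
    sortA c = PySem.List.sorted2 c (fun c => c.2) (fun c => c.1) :=
  PySem.List.eq_of_perm_of_pairwise_le_of_injective keyL keyL_inj
    ((sortA_perm c).trans (PySem.List.sorted2_perm c _ _ false).symm)
    (sortA_pairwise c) (sorted2_pairwise_keyL c)

-- ===== VERDICT (by name: the statement is the Claim_ definition above) =====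
theorem solution_spec : Claim_equal_solution := by
  intro N all_coordinates _ _
  unfold Spec_solution solution solution_alt
  rw [sortA_eq_sorted2]
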